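-- pv_equiv track=rewrite | github.com/lucco17/Advent_of_code | 2022/23/code.py | get_adjacents
-- ===== SOURCE A (Python) =====
-- def get_adjacents(pos, direction='all'):
-- 	adjs = [(pos[0] - 1, pos[1] - 1), (pos[0] - 1, pos[1]), (pos[0] - 1, pos[1] + 1),
-- 			(pos[0], pos[1] - 1), (pos[0], pos[1] + 1),
-- 			(pos[0] + 1, pos[1] - 1), (pos[0] + 1, pos[1]), (pos[0] + 1, pos[1] + 1)]
-- 	if direction == 'N':
-- 		return adjs[:3]
-- 	if direction == 'S':
-- 		return adjs[-3:]
-- 	if direction == 'E':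
-- 		return [adjs[i] for i in [2, 4, 7]]
-- 	if direction == 'W':
-- 		return [adjs[i] for i in [0, 3, 5]]
-- 	return adjs
-- ===== SOURCE B (Python) =====
-- def get_adjacents(pos, direction='all'):
--     out = []
--     for dr in (-1, 0, 1):
--         for dc in (-1, 0, 1):
--             if dr == 0 and dc == 0:
--                 continue
--             if direction == 'N' and dr != -1:
--                 continue
--             if direction == 'S' and dr != 1:
--                 continue
--             if direction == 'E' and dc != 1:
--                 continue
--             if direction == 'W' and dc != -1:
--                 continue
--             out.append((pos[0] + dr, pos[1] + dc))
--     return out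
-- ===== Notes on version B (the rewrite author's own statement) =====
-- stated objective: alternative
-- what changed: B enumerates offsets (dr,dc) in a nested loop over {-1,0,1}x{-1,0,1} and filters each by a per-direction predicate (N: dr=-1, S: dr=1, E: dc=1, W: dc=-1, skipping (0,0)), instead of building all 8 neighbors and selecting slices/index subsets.
import Mathlib
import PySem

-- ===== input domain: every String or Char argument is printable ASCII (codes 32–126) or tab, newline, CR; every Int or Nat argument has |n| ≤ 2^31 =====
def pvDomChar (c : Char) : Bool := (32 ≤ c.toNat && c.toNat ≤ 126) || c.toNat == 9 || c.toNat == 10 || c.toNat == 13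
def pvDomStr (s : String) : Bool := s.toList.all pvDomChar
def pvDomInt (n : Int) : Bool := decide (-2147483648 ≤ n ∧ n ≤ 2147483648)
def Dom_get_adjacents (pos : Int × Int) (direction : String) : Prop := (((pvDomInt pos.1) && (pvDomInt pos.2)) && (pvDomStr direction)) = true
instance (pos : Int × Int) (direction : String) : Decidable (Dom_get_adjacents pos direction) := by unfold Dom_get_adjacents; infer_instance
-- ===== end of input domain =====

-- B generates the 8 offsets by a nested loop and filters with a per-direction predicate, instead of building all 8 neighbors and slicing/indexing (alternative decomposition; same cost).

-- ===== PORT A =====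
def get_adjacents (pos : Int × Int) (direction : String) : List (Int × Int) :=
  let adjs : List (Int × Int) :=
    [(pos.1 - 1, pos.2 - 1), (pos.1 - 1, pos.2), (pos.1 - 1, pos.2 + 1),
     (pos.1, pos.2 - 1), (pos.1, pos.2 + 1),
     (pos.1 + 1, pos.2 - 1), (pos.1 + 1, pos.2), (pos.1 + 1, pos.2 + 1)]
  if direction = "N" then PySem.List.slice adjs none (some 3)
  else if direction = "S" then PySem.List.slice adjs (some (-3)) none
  else if direction = "E" then ([2, 4, 7] : List Int).map (fun i => PySem.List.pyGetD adjs i (0, 0))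
  else if direction = "W" then ([0, 3, 5] : List Int).map (fun i => PySem.List.pyGetD adjs i (0, 0))
  else adjs

-- ===== PORT B =====
def get_adjacents_alt (pos : Int × Int) (direction : String) : List (Int × Int) :=
  ([-1, 0, 1] : List Int).foldl (fun out dr =>
    ([-1, 0, 1] : List Int).foldl (fun out dc =>
      if dr = 0 ∧ dc = 0 then out
      else if direction = "N" ∧ dr ≠ -1 then out
      else if direction = "S" ∧ dr ≠ 1 then out
      else if direction = "E" ∧ dc ≠ 1 then out
      else if direction = "W" ∧ dc ≠ -1 then out
      else out ++ [(pos.1 + dr, pos.2 + dc)]) out) []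

-- ===== PRECONDITION & SPEC =====
def Spec_get_adjacents (pos : Int × Int) (direction : String) (out : List (Int × Int)) : Prop := out = get_adjacents_alt pos direction
instance (pos : Int × Int) (direction : String) (out : List (Int × Int)) : Decidable (Spec_get_adjacents pos direction out) := by unfold Spec_get_adjacents; infer_instance

-- ===== CLAIM (what is proved, stated in full; the proofs are below) =====
def Claim_equal_get_adjacents : Prop := ∀ (pos : Int × Int) (direction : String), Dom_get_adjacents pos direction → Spec_get_adjacents pos direction (get_adjacents pos direction)

-- ===== LEMMAS AND PROOFS =====

-- ===== VERDICT (by name: the statement is the Claim_ definition above) =====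
theorem get_adjacents_spec : Claim_equal_get_adjacents := by
  intro pos direction _
  unfold Spec_get_adjacents get_adjacents get_adjacents_alt
  by_cases hN : direction = "N"
  · simp [hN, List.foldl, PySem.List.slice]; omega
  · by_cases hS : direction = "S"
    · simp [hS, List.foldl, PySem.List.slice]; omega
    · by_cases hE : direction = "E"
      · simp [hE, List.foldl, PySem.List.pyGetD]; omega
      · by_cases hW : direction = "W"
        · simp [hW, List.foldl, PySem.List.pyGetD]; omega
        · simp [hN, hS, hE, hW, List.foldl]; omega
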